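-- pv_equiv track=rewrite | github.com/frgmt0/pearl | src/utils/fen.py | get_castling_rights
-- ===== SOURCE A (Python) =====
-- def get_castling_rights(fen):
--     """
--     Get the castling rights from a FEN string.
--
--     Args:
--         fen: FEN string
--
--     Returns:
--         Dictionary with castling rights
--     """
--     result = {
--         'K': False,  # White kingside
--         'Q': False,  # White queenside
--         'k': False,  # Black kingside
--         'q': False   # Black queenside
--     }
--
--     try:
--         parts = fen.split(' ')
--         if len(parts) >= 3:
--             castling = parts[2]
--             if castling != '-':
--                 for c in castling:
--                     if c in result:
--                         result[c] = True
--     except: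
--         pass
--
--     return result
-- ===== SOURCE B (Python) =====
-- def get_castling_rights(fen):
--     """Idiomatic rewrite: iterate the four fixed keys and substring-test
--     the castling field, instead of looping over the field's characters."""
--     try:
--         parts = fen.split(' ')
--         castling = parts[2] if len(parts) >= 3 else ''
--     except:
--         castling = ''
--     return {k: k in castling for k in ('K', 'Q', 'k', 'q')}
-- ===== Notes on version B (the rewrite author's own statement) =====
-- stated objective: idiomatic
-- what changed: B inverts the traversal: instead of scanning the castling field character by character and mutating a pre-built dict on key hits, it builds the dict in one comprehension over the four fixed keys, substring-testing the field for each, with no special case for the empty-rights marker.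
import Mathlib
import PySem

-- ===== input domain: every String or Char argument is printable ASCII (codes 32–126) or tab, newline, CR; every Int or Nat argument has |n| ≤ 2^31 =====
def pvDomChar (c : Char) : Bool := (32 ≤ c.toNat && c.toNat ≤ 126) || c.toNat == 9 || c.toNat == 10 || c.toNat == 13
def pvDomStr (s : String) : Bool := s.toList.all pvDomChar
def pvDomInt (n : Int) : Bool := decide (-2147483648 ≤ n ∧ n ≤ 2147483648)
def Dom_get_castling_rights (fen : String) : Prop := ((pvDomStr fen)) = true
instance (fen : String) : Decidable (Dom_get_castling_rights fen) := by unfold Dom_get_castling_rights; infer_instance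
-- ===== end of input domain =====

-- B iterates the four fixed keys and substring-tests the castling field, instead of
-- scanning the field's characters and mutating a pre-built dict (objective: idiomatic).

-- ===== PORT A =====
-- 'for c in castling: if c in result: result[c] = True' — scan the field, hit the dict.
def get_castling_rights (fen : String) : List (String × Bool) :=
  let result : PySem.Dict String Bool :=
    ((((PySem.Dict.empty.insert "K" false).insert "Q" false).insert "k" false).insert "q" false)
  let parts := (PySem.Str.split? fen " ").getD []   -- sep " " is nonempty, split? is always some
  let result :=
    if 3 ≤ parts.length then
      let castling := parts.getD 2 ""               -- parts[2]; in range by the guard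
      if castling ≠ "-" then
        castling.toList.foldl
          (fun d c =>
            if d.contains (String.ofList [c]) then d.insert (String.ofList [c]) true else d)
          result
      else result
    else result
  result.items

-- ===== PORT B =====
-- '{k: k in castling for k in ('K','Q','k','q')}' — iterate the keys, test the field.
def get_castling_rights_alt (fen : String) : List (String × Bool) :=
  let parts := (PySem.Str.split? fen " ").getD []   -- sep " " is nonempty, split? is always some
  let castling := if 3 ≤ parts.length then parts.getD 2 "" else ""
  ["K", "Q", "k", "q"].map (fun k => (k, PySem.Str.isIn k castling))

-- ===== PRECONDITION & SPEC =====
def Spec_get_castling_rights (fen : String) (out : List (String × Bool)) : Prop := out = get_castling_rights_alt fen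
instance (fen : String) (out : List (String × Bool)) : Decidable (Spec_get_castling_rights fen out) := by unfold Spec_get_castling_rights; infer_instance

-- ===== CLAIM (what is proved, stated in full; the proofs are below) =====
def Claim_equal_get_castling_rights : Prop := ∀ (fen : String), Dom_get_castling_rights fen → Spec_get_castling_rights fen (get_castling_rights fen)

-- ===== LEMMAS AND PROOFS =====

-- String.ofList [x] equals a one-character literal iff the characters agree.
theorem ofList_singleton_eq_iff (x y : Char) : (String.ofList [x] = String.ofList [y]) ↔ x = y := by
  constructor
  · intro h
    have := congrArg String.toList h
    simpa using this
  · rintro rfl; rfl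

-- the four-entry dict with given flags
def dmk (a b c d : Bool) : PySem.Dict String Bool :=
  PySem.Dict.mk [("K", a), ("Q", b), ("k", c), ("q", d)]

theorem init_eq_dmk :
    ((((PySem.Dict.empty.insert "K" false).insert "Q" false).insert "k" false).insert "q" (false : Bool))
      = dmk false false false false := by decide

-- one step of A's loop on the four-key dict
theorem step_dmk (a b c d : Bool) (x : Char) :
    (if (dmk a b c d).contains (String.ofList [x])
       then (dmk a b c d).insert (String.ofList [x]) true else dmk a b c d)
      = dmk (a || (x == 'K')) (b || (x == 'Q')) (c || (x == 'k')) (d || (x == 'q')) := by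
  by_cases hK : x = 'K'
  · subst hK; simp [dmk, PySem.Dict.contains, PySem.Dict.insert]
  by_cases hQ : x = 'Q'
  · subst hQ; simp [dmk, PySem.Dict.contains, PySem.Dict.insert]
  by_cases hk : x = 'k'
  · subst hk; simp [dmk, PySem.Dict.contains, PySem.Dict.insert]
  by_cases hq : x = 'q'
  · subst hq; simp [dmk, PySem.Dict.contains, PySem.Dict.insert]
  · have eK : ¬ ("K" = String.ofList [x]) := fun h => hK ((ofList_singleton_eq_iff x 'K').mp h.symm)
    have eQ : ¬ ("Q" = String.ofList [x]) := fun h => hQ ((ofList_singleton_eq_iff x 'Q').mp h.symm)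
    have ek : ¬ ("k" = String.ofList [x]) := fun h => hk ((ofList_singleton_eq_iff x 'k').mp h.symm)
    have eq' : ¬ ("q" = String.ofList [x]) := fun h => hq ((ofList_singleton_eq_iff x 'q').mp h.symm)
    simp [dmk, PySem.Dict.contains, beq_iff_eq, eK, eQ, ek, eq', hK, hQ, hk, hq]

-- Bool-level form of Char equality testing
theorem char_beq_decide (x y : Char) : (x == y) = decide (x = y) := by
  by_cases h : x = y <;> simp [h]

-- A's whole loop, characterised: each flag becomes flag ∨ (key occurs in the field)
theorem fold_dmk (cs : List Char) (a b c d : Bool) :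
    cs.foldl
      (fun d' c' =>
        if d'.contains (String.ofList [c']) then d'.insert (String.ofList [c']) true else d')
      (dmk a b c d)
      = dmk (a || cs.contains 'K') (b || cs.contains 'Q') (c || cs.contains 'k') (d || cs.contains 'q') := by
  induction cs generalizing a b c d with
  | nil => simp [dmk]
  | cons x rest ih =>
    rw [List.foldl_cons, step_dmk, ih]
    simp [Bool.or_assoc, eq_comm, char_beq_decide]

-- 'k in s' for a one-character needle is character membership
theorem isIn_singleton (k : Char) (cs : List Char) :
    PySem.Chars.isIn [k] cs = cs.contains k := by
  by_cases h : k ∈ cs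
  · have : [k] <:+: cs := by
      rcases List.append_of_mem h with ⟨s, t, rfl⟩
      exact ⟨s, t, by simp⟩
    simp [(PySem.Chars.isIn_iff_infix _ _).mpr this, h]
  · have : ¬ [k] <:+: cs := by
      rintro ⟨s, t, rfl⟩
      exact h (by simp)
    simp [(PySem.Chars.isIn_eq_false_iff _ _).mpr this, h]

-- ===== VERDICT (by name: the statement is the Claim_ definition above) =====
theorem get_castling_rights_spec : Claim_equal_get_castling_rights := by
  intro fen _
  unfold Spec_get_castling_rights get_castling_rights get_castling_rights_alt
  rw [init_eq_dmk]
  by_cases hlen : 3 ≤ ((PySem.Str.split? fen " ").getD []).length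
  · simp only [hlen, if_pos]
    by_cases hdash : ((PySem.Str.split? fen " ").getD []).getD 2 "" = "-"
    · rw [hdash]; decide
    · simp only [hdash, ne_eq, not_false_eq_true, if_pos, fold_dmk]
      simp [dmk, PySem.Str.isIn, isIn_singleton]
  · simp only [hlen, if_neg, not_false_eq_true]
    decide
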